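-- pv_equiv track=rewrite | github.com/Shao-wei-p/algoritmia22-23 | Problema1/shortest_path.py | path_recover
-- ===== SOURCE A (Python) =====
-- Vertex = tuple[int, int]
--
-- Edge = tuple[Vertex, Vertex]
--
-- def path_recover(edges: list[Edge],
--                  target: Vertex) -> list[Vertex]:
--     # construir diccionario bp
--     bp = {}  # diccionario
--     for e in edges:
--         u, v = e
--         bp[v] = u  # el padre de v es u
--     # recuperar el camino deste target(while)
--     path = [target]
--     v = target
--     while v != bp[v]:
--         v = bp[v]
--         path.append(v)
--
--     return path
-- ===== SOURCE B (Python) =====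
-- def path_recover(edges, target):
--     # Bellman-Ford-style: instead of walking parent pointers up from the target,
--     # propagate the complete path-to-root down from the roots to every vertex by
--     # relaxation rounds over the parent map, then just look the target up.
--     bp = {}
--     for u, v in edges:
--         bp[v] = u
--     known = {v: [v] for v, u in bp.items() if u == v}
--     for _ in range(len(edges)):
--         for v, u in bp.items():
--             if v not in known and u in known:
--                 known[v] = [v] + known[u]
--     return known[target]
-- ===== Notes on version B (the rewrite author's own statement) =====
-- stated objective: alternative
-- what changed: B never follows parent pointers up from the target: it seeds every root (self-loop) with its trivial path and propagates the full path-to-root down to every vertex by Bellman-Ford-style relaxation rounds over the parent map, then merely looks the target up; it trades A's single upward chain walk for global downward propagation.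
import Mathlib
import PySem

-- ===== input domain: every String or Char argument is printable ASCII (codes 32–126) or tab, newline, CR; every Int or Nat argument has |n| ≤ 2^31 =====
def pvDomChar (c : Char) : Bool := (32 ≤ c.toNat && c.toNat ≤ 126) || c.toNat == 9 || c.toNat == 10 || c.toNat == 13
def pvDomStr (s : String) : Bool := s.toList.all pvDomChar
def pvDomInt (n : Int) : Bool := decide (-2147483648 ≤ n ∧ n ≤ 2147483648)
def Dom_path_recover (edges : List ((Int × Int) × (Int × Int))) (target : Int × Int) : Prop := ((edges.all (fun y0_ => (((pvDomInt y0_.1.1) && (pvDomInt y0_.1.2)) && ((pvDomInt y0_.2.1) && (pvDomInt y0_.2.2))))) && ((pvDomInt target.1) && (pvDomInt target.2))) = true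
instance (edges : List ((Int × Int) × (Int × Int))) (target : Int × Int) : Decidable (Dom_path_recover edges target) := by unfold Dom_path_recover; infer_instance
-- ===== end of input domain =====

-- B replaces A's upward parent-pointer walk from the target by Bellman-Ford-style
-- relaxation: every root (self-loop) is seeded with its trivial path and full
-- paths-to-root are propagated down to every vertex, then the target is looked up.
-- Neither version mutates its arguments.  A's loop in Lean carries fuel
-- edges.length + 1, ample on every input admitted by Pre_ (a terminating chain
-- visits distinct dictionary keys).

-- ===== PORT A =====
-- while v != bp[v]: v = bp[v]; path.append(v)   (bp[v] missing = KeyError → excluded by Pre_)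
def pathLoopA (bp : PySem.Dict (Int × Int) (Int × Int)) : Nat → (Int × Int) → List (Int × Int) → List (Int × Int)
  | 0, _, path => path
  | n + 1, v, path =>
    match bp.get? v with
    | none => path            -- KeyError in Python; unreachable under Pre_
    | some u => if u = v then path else pathLoopA bp n u (path ++ [u])

def path_recover (edges : List ((Int × Int) × (Int × Int))) (target : Int × Int) : List (Int × Int) :=
  let bp := edges.foldl (fun d e => d.insert e.2 e.1) PySem.Dict.empty
  pathLoopA bp (edges.length + 1) target [target]

-- ===== PORT B =====
-- if v not in known and u in known: known[v] = [v] + known[u]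
def relaxStep (kn : PySem.Dict (Int × Int) (List (Int × Int))) (p : (Int × Int) × (Int × Int)) :
    PySem.Dict (Int × Int) (List (Int × Int)) :=
  if !kn.contains p.1 && kn.contains p.2 then kn.insert p.1 (p.1 :: kn.getD p.2 []) else kn

def path_recover_alt (edges : List ((Int × Int) × (Int × Int))) (target : Int × Int) : List (Int × Int) :=
  let bp := edges.foldl (fun d e => d.insert e.2 e.1) PySem.Dict.empty
  -- known = {v: [v] for v, u in bp.items() if u == v}
  let known0 := (bp.items.filter (fun p => p.2 == p.1)).foldl
      (fun d p => d.insert p.1 [p.1]) PySem.Dict.empty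
  -- for _ in range(len(edges)): for v, u in bp.items(): …
  let known := (List.range edges.length).foldl
      (fun kn _ => bp.items.foldl relaxStep kn) known0
  -- return known[target]   (KeyError in Python outside Pre_; the default [] is unreachable under Pre_)
  (known.get? target).getD []

-- ===== PRECONDITION & SPEC =====
-- the parent of v induced by the edge list (last edge whose child is v wins, as dict overwrite does)
def pvParent (edges : List ((Int × Int) × (Int × Int))) (v : Int × Int) : Option (Int × Int) :=
  (edges.reverse.find? (fun e => e.2 == v)).map (·.1)

-- the k-th iterate of the parent map, starting at v (none once the chain leaves the map)
def pvIter (edges : List ((Int × Int) × (Int × Int))) (k : Nat) (v : Int × Int) : Option (Int × Int) :=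
  (fun o => o.bind (pvParent edges))^[k] (some v)

-- Pre_ excludes exactly the inputs on which A does not return: A raises KeyError when a
-- vertex on the chain has no parent, and loops forever when the chain runs into a cycle.
-- Closed form: some iterate of the parent map within |edges| steps is a defined fixpoint
-- (a terminating chain visits distinct dictionary keys, of which there are at most |edges|).
def Pre_path_recover (edges : List ((Int × Int) × (Int × Int))) (target : Int × Int) : Prop :=
  ∃ k ∈ Finset.range (edges.length + 1),
    pvIter edges (k + 1) target = pvIter edges k target ∧ (pvIter edges k target).isSome

instance (edges : List ((Int × Int) × (Int × Int))) (target : Int × Int) : Decidable (Pre_path_recover edges target) := by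
  unfold Pre_path_recover; infer_instance

def pvWitness_path_recover : (List ((Int × Int) × (Int × Int))) × (Int × Int) :=
  ([((0, 0), (0, 0)), ((0, 0), (1, 0))], (1, 0))

def Spec_path_recover (edges : List ((Int × Int) × (Int × Int))) (target : Int × Int) (out : List (Int × Int)) : Prop := out = path_recover_alt edges target
instance (edges : List ((Int × Int) × (Int × Int))) (target : Int × Int) (out : List (Int × Int)) : Decidable (Spec_path_recover edges target out) := by unfold Spec_path_recover; infer_instance

-- ===== CLAIM =====
def Claim_equal_path_recover : Prop := ∀ (edges : List ((Int × Int) × (Int × Int))) (target : Int × Int), Dom_path_recover edges target → Pre_path_recover edges target → Spec_path_recover edges target (path_recover edges target)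

-- ===== LEMMAS AND PROOFS =====

-- 'l is the full path from v to its root in the parent map bp'
inductive PvChain (bp : PySem.Dict (Int × Int) (Int × Int)) : (Int × Int) → List (Int × Int) → Prop
  | fix {v : Int × Int} : bp.get? v = some v → PvChain bp v [v]
  | step {v u : Int × Int} {l : List (Int × Int)} :
      bp.get? v = some u → u ≠ v → PvChain bp u l → PvChain bp v (v :: l)

theorem pvChain_head {bp : PySem.Dict (Int × Int) (Int × Int)} {v : Int × Int}
    {l : List (Int × Int)} (h : PvChain bp v l) : ∃ t, l = v :: t := by
  cases h with
  | fix _ => exact ⟨[], rfl⟩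
  | step _ _ _ => exact ⟨_, rfl⟩

theorem pvChain_unique {bp : PySem.Dict (Int × Int) (Int × Int)} {v : Int × Int}
    {l₁ l₂ : List (Int × Int)} (h₁ : PvChain bp v l₁) (h₂ : PvChain bp v l₂) : l₁ = l₂ := by
  induction h₁ generalizing l₂ with
  | fix hv =>
    cases h₂ with
    | fix _ => rfl
    | step hu hne _ => rw [hv] at hu; exact absurd (Option.some.inj hu).symm hne
  | step hu hne _ ih =>
    cases h₂ with
    | fix hv => rw [hv] at hu; exact absurd (Option.some.inj hu).symm hne
    | step hu' _ hc' =>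
      rw [hu] at hu'
      cases Option.some.inj hu'
      rw [ih hc']

-- A's loop computes the tail of the chain once the fuel covers its length
theorem pathLoopA_chain (bp : PySem.Dict (Int × Int) (Int × Int))
    {v : Int × Int} {l : List (Int × Int)} (h : PvChain bp v l) :
    ∀ (n : Nat), l.tail.length ≤ n → ∀ (path : List (Int × Int)),
      pathLoopA bp n v path = path ++ l.tail := by
  induction h with
  | fix hv =>
    intro n _ path
    cases n with
    | zero => simp [pathLoopA]
    | succ m => simp [pathLoopA, hv]
  | step hu hne hc ih =>
    rename_i v u l'
    obtain ⟨t', rfl⟩ := pvChain_head hc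
    intro n hn path
    cases n with
    | zero => simp at hn
    | succ m =>
      simp only [pathLoopA, hu]
      rw [if_neg hne, ih m (by simpa using hn) (path ++ [u])]
      simp

-- The fold-built dictionary's lookup equals the reverse scan of the edge list.
theorem get?_foldl_insert (l : List ((Int × Int) × (Int × Int)))
    (d : PySem.Dict (Int × Int) (Int × Int)) (x : Int × Int) :
    (l.foldl (fun d e => d.insert e.2 e.1) d).get? x
      = match l.reverse.find? (fun e => e.2 == x) with
        | some e => some e.1
        | none => d.get? x := by
  induction l generalizing d with
  | nil => simp
  | cons e t ih =>
    simp only [List.foldl_cons, List.reverse_cons, List.find?_append]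
    rw [ih]
    cases h : t.reverse.find? (fun e => e.2 == x) with
    | some e' => simp
    | none =>
      simp only [Option.none_or]
      rw [PySem.Dict.get?_insert]
      by_cases hx : e.2 = x
      · subst hx; simp
      · simp [hx]
        intro h; exact absurd h.symm hx

theorem get?_bp_eq_pvParent (edges : List ((Int × Int) × (Int × Int))) (x : Int × Int) :
    (edges.foldl (fun d e => d.insert e.2 e.1) PySem.Dict.empty).get? x = pvParent edges x := by
  rw [get?_foldl_insert]
  unfold pvParent
  cases h : edges.reverse.find? (fun e => e.2 == x) <;> simp

theorem nodup_keys_bp (edges : List ((Int × Int) × (Int × Int))) :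
    (edges.foldl (fun d e => d.insert e.2 e.1) PySem.Dict.empty).keys.Nodup := by
  exact PySem.Dict.nodup_keys_foldl_insert_key edges (fun e => e.2) (fun d e => e.1)
    PySem.Dict.empty (by simp [PySem.Dict.keys_empty])

-- shift the iterate by one step
theorem pvIter_succ (edges : List ((Int × Int) × (Int × Int))) (k : Nat) (v u : Int × Int)
    (h : pvParent edges v = some u) : pvIter edges (k + 1) v = pvIter edges k u := by
  unfold pvIter
  rw [Function.iterate_succ_apply]
  simp [h]

-- once the chain leaves the map, every later iterate is none
theorem pvIter_none (edges : List ((Int × Int) × (Int × Int))) (v : Int × Int)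
    (hp : pvParent edges v = none) (m : Nat) : pvIter edges (m + 1) v = none := by
  have hnone : ∀ j, (fun o => o.bind (pvParent edges))^[j] (none : Option (Int × Int)) = none := by
    intro j
    induction j with
    | zero => rfl
    | succ i ih => rw [Function.iterate_succ_apply]; simpa using ih
  unfold pvIter
  rw [Function.iterate_succ_apply]
  simp only [Option.bind_some, hp]
  exact hnone m

-- A fixpoint of the iterates yields a chain no longer than the step count
theorem pvIter_chain (edges : List ((Int × Int) × (Int × Int))) :
    ∀ (k : Nat) (v : Int × Int),
      pvIter edges (k + 1) v = pvIter edges k v → (pvIter edges k v).isSome →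
      ∃ t, PvChain (edges.foldl (fun d e => d.insert e.2 e.1) PySem.Dict.empty) v (v :: t) ∧
        t.length ≤ k := by
  intro k
  induction k with
  | zero =>
    intro v hfix _
    have h0 : pvIter edges 0 v = some v := rfl
    rw [h0] at hfix
    have h1 : pvIter edges 1 v = pvParent edges v := by
      unfold pvIter; simp
    rw [h1] at hfix
    refine ⟨[], PvChain.fix ?_, le_refl 0⟩
    rw [get?_bp_eq_pvParent]; exact hfix
  | succ k ih =>
    intro v hfix hsome
    cases hp : pvParent edges v with
    | none =>
      exfalso
      rw [pvIter_none edges v hp k] at hsome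
      simp at hsome
    | some u =>
      by_cases huv : u = v
      · subst huv
        refine ⟨[], PvChain.fix ?_, by simp⟩
        rw [get?_bp_eq_pvParent]; exact hp
      · have hshift : ∀ m, pvIter edges (m + 1) v = pvIter edges m u :=
          fun m => pvIter_succ edges m v u hp
        have hfix' : pvIter edges (k + 1) u = pvIter edges k u := by
          rw [← hshift (k + 1), ← hshift k]; exact hfix
        have hsome' : (pvIter edges k u).isSome := by rw [← hshift k]; exact hsome
        obtain ⟨t, hc, hlen⟩ := ih u hfix' hsome'
        refine ⟨u :: t, PvChain.step ?_ huv hc, by simpa using Nat.succ_le_succ hlen⟩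
        rw [get?_bp_eq_pvParent]; exact hp

-- ===== B-side invariants =====

-- every recorded path is the true chain
def InvB (bp : PySem.Dict (Int × Int) (Int × Int))
    (kn : PySem.Dict (Int × Int) (List (Int × Int))) : Prop :=
  ∀ x l, kn.get? x = some l → PvChain bp x l

theorem invB_relaxStep (bp : PySem.Dict (Int × Int) (Int × Int)) (hnd : bp.keys.Nodup)
    (p : (Int × Int) × (Int × Int)) (hp : p ∈ bp.items)
    (kn : PySem.Dict (Int × Int) (List (Int × Int))) (h : InvB bp kn) :
    InvB bp (relaxStep kn p) := by
  unfold relaxStep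
  split_ifs with hg
  · intro x l hx
    rw [PySem.Dict.get?_insert] at hx
    split_ifs at hx with hxp
    · subst hxp
      cases Option.some.inj hx
      simp only [Bool.and_eq_true, Bool.not_eq_true'] at hg
      have hc2 : (kn.get? p.2).isSome := by
        rw [← PySem.Dict.contains_eq_isSome_get?]; exact hg.2
      obtain ⟨l₂, hl₂⟩ := Option.isSome_iff_exists.mp hc2
      have hget : bp.get? p.1 = some p.2 := PySem.Dict.get?_of_mem_items bp hp hnd
      have hne : p.2 ≠ p.1 := by
        intro he
        have hcv : kn.contains p.1 = true := by rw [← he]; exact hg.2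
        rw [hcv] at hg
        exact absurd hg.1 (by simp)
      have hgd : kn.getD p.2 [] = l₂ := PySem.Dict.getD_of_get?_eq_some kn [] hl₂
      rw [hgd]
      exact PvChain.step hget hne (h p.2 l₂ hl₂)
    · exact h x l hx
  · exact h

theorem invB_fold (bp : PySem.Dict (Int × Int) (Int × Int)) (hnd : bp.keys.Nodup) :
    ∀ (ps : List ((Int × Int) × (Int × Int))), (∀ p ∈ ps, p ∈ bp.items) →
      ∀ kn, InvB bp kn → InvB bp (ps.foldl relaxStep kn) := by
  intro ps
  induction ps with
  | nil => intro _ kn h; exact h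
  | cons p ps ih =>
    intro hmem kn h
    exact ih (fun q hq => hmem q (List.mem_cons_of_mem p hq))
      (relaxStep kn p) (invB_relaxStep bp hnd p (hmem p List.mem_cons_self) kn h)

theorem invB_known0 (bp : PySem.Dict (Int × Int) (Int × Int)) :
    ∀ (ps : List ((Int × Int) × (Int × Int))),
      (∀ p ∈ ps, bp.get? p.1 = some p.1) →
      ∀ kn, InvB bp kn →
        InvB bp (ps.foldl (fun d p => d.insert p.1 [p.1]) kn) := by
  intro ps
  induction ps with
  | nil => intro _ kn h; exact h
  | cons p ps ih =>
    intro hmem kn h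
    refine ih (fun q hq => hmem q (List.mem_cons_of_mem p hq)) _ ?_
    intro x l hx
    rw [PySem.Dict.get?_insert] at hx
    split_ifs at hx with hxp
    · subst hxp; cases Option.some.inj hx
      exact PvChain.fix (hmem p List.mem_cons_self)
    · exact h x l hx

-- membership only grows
theorem contains_relaxStep (kn : PySem.Dict (Int × Int) (List (Int × Int)))
    (p : (Int × Int) × (Int × Int)) (x : Int × Int) (h : kn.contains x = true) :
    (relaxStep kn p).contains x = true := by
  unfold relaxStep
  split_ifs
  · rw [PySem.Dict.contains_insert]; simp [h]
  · exact h

theorem contains_fold (ps : List ((Int × Int) × (Int × Int)))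
    (kn : PySem.Dict (Int × Int) (List (Int × Int))) (x : Int × Int)
    (h : kn.contains x = true) : (ps.foldl relaxStep kn).contains x = true := by
  induction ps generalizing kn with
  | nil => exact h
  | cons p ps ih => exact ih (relaxStep kn p) (contains_relaxStep kn p x h)

-- a round inserts v once its parent u is known and (v, u) is an item
theorem contains_fold_hit (v u : Int × Int) :
    ∀ (ps : List ((Int × Int) × (Int × Int))), (v, u) ∈ ps →
      ∀ kn, kn.contains u = true → (ps.foldl relaxStep kn).contains v = true := by
  intro ps
  induction ps with
  | nil => intro h; simp at h
  | cons p ps ih =>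
    intro hmem kn hu
    rcases List.mem_cons.mp hmem with heq | hmem'
    · subst heq
      rw [List.foldl_cons]
      apply contains_fold
      by_cases hv : kn.contains v = true
      · exact contains_relaxStep kn (v, u) v hv
      · have hv' : kn.contains v = false := by
          cases hb : kn.contains v
          · rfl
          · exact absurd hb hv
        unfold relaxStep
        have hg : (!kn.contains (v, u).1 && kn.contains (v, u).2) = true := by
          simp only [hv', hu]; rfl
        rw [if_pos hg, PySem.Dict.contains_insert]
        simp
    · exact ih hmem' (relaxStep kn p) (contains_relaxStep kn p u hu)

-- unrolling the rounds fold over List.range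
theorem rounds_succ (round : PySem.Dict (Int × Int) (List (Int × Int)) → PySem.Dict (Int × Int) (List (Int × Int)))
    (n : Nat) (kn : PySem.Dict (Int × Int) (List (Int × Int))) :
    (List.range (n + 1)).foldl (fun kn _ => round kn) kn
      = round ((List.range n).foldl (fun kn _ => round kn) kn) := by
  rw [List.range_succ, List.foldl_append]
  rfl

theorem contains_known0 (v : Int × Int) :
    ∀ (ps : List ((Int × Int) × (Int × Int))), (∃ u, (v, u) ∈ ps) →
      ∀ (kn : PySem.Dict (Int × Int) (List (Int × Int))), (ps.foldl (fun d p => d.insert p.1 [p.1]) kn).contains v = true := by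
  intro ps
  induction ps with
  | nil => intro h; simp at h
  | cons p ps ih =>
    intro hmem kn
    obtain ⟨u, hu⟩ := hmem
    rcases List.mem_cons.mp hu with heq | hmem'
    · subst heq
      have hpers : ∀ (qs : List ((Int × Int) × (Int × Int))) kn',
          kn'.contains v = true →
          (qs.foldl (fun (d : PySem.Dict (Int × Int) (List (Int × Int))) p => d.insert p.1 [p.1]) kn').contains v = true := by
        intro qs
        induction qs with
        | nil => intro kn' h; exact h
        | cons q qs ihq =>
          intro kn' h
          apply ihq
          rw [PySem.Dict.contains_insert]; simp [h]
      rw [List.foldl_cons]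
      apply hpers
      rw [PySem.Dict.contains_insert]; simp
    · exact ih ⟨u, hmem'⟩ _

-- completeness: a vertex whose chain tail has length ≤ n is known after n rounds
theorem contains_rounds (bp : PySem.Dict (Int × Int) (Int × Int))
    (known0 : PySem.Dict (Int × Int) (List (Int × Int)))
    (hk0 : ∀ x, bp.get? x = some x → known0.contains x = true)
    {v : Int × Int} {l : List (Int × Int)} (h : PvChain bp v l) :
    ∀ n, l.tail.length ≤ n →
      ((List.range n).foldl (fun kn _ => bp.items.foldl relaxStep kn) known0).contains v = true := by
  induction h with
  | fix hv =>
    intro n _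
    induction n with
    | zero => exact hk0 _ hv
    | succ m ihm => rw [rounds_succ]; exact contains_fold _ _ _ (ihm (by simp))
  | step hu hne hc ih =>
    rename_i v u l'
    obtain ⟨t', rfl⟩ := pvChain_head hc
    intro n hn
    cases n with
    | zero => simp at hn
    | succ m =>
      rw [rounds_succ]
      have hmemu := ih m (by simpa using hn)
      have hvu : (v, u) ∈ bp.items := PySem.Dict.mem_items_of_get?_eq_some bp hu
      exact contains_fold_hit v u bp.items hvu _ hmemu

-- ===== VERDICT =====
theorem path_recover_spec : Claim_equal_path_recover := by
  intro edges target _ hpre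
  obtain ⟨k, hk, hfix, hsome⟩ := hpre
  unfold Spec_path_recover path_recover path_recover_alt
  set bp := edges.foldl (fun d e => d.insert e.2 e.1) PySem.Dict.empty with hbp
  have hnd : bp.keys.Nodup := nodup_keys_bp edges
  obtain ⟨t, hc, hlen⟩ := pvIter_chain edges k target hfix hsome
  have hkle : k ≤ edges.length := by
    have := Finset.mem_range.mp hk; omega
  -- A's side
  have hA : pathLoopA bp (edges.length + 1) target [target] = [target] ++ t :=
    pathLoopA_chain bp hc (edges.length + 1) (by simp; omega) [target]
  -- B's side
  set ps := bp.items.filter (fun p => p.2 == p.1) with hps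
  set known0 := ps.foldl (fun d p => d.insert p.1 [p.1]) PySem.Dict.empty with hknown0
  set known := (List.range edges.length).foldl (fun kn _ => bp.items.foldl relaxStep kn) known0 with hknown
  have hk0mem : ∀ x, bp.get? x = some x → known0.contains x = true := by
    intro x hx
    apply contains_known0
    refine ⟨x, ?_⟩
    rw [hps, List.mem_filter]
    exact ⟨PySem.Dict.mem_items_of_get?_eq_some bp hx, by simp⟩
  have hmem : known.contains target = true :=
    contains_rounds bp known0 hk0mem hc edges.length (by simp; omega)
  have hInv0 : InvB bp known0 := by
    apply invB_known0 bp
    · intro p hp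
      rw [hps, List.mem_filter] at hp
      have hg := PySem.Dict.get?_of_mem_items bp hp.1 hnd
      have heq : p.2 = p.1 := by simpa using hp.2
      rw [heq] at hg; exact hg
    · intro x l hx
      rw [PySem.Dict.get?_empty] at hx; cases hx
  have hInv : InvB bp known := by
    rw [hknown]
    generalize known0 = kn₀ at hInv0 ⊢
    induction edges.length with
    | zero => exact hInv0
    | succ m ihm =>
      rw [rounds_succ]
      exact invB_fold bp hnd bp.items (fun _ h => h) _ ihm
  have hsomeT : (known.get? target).isSome := by
    rw [← PySem.Dict.contains_eq_isSome_get?]; exact hmem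
  obtain ⟨l, hl⟩ := Option.isSome_iff_exists.mp hsomeT
  have hlt : l = target :: t := pvChain_unique (hInv target l hl) hc
  rw [hA]
  show ([target] ++ t) = (known.get? target).getD []
  rw [hl, hlt]
  rfl
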